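-- pv_equiv track=rewrite | github.com/kh277/BOJ | 백준/Platinum/25821. Palindromic Primes/Palindromic Primes.py | solve
-- ===== SOURCE A (Python) =====
-- def modPow(base, exp, MOD):
--     result = 1
--     while exp:
--         if exp & 1:
--             result = (result*base) % MOD
--         base = (base*base) % MOD
--         exp >>= 1
--
--     return result
--
-- def millerRabin(num, base):
--     if num % base == 0:
--         return False
--
--     exp = num-1
--     while True:
--         temp = modPow(base, exp, num)
--         if exp & 1:
--             return True if temp != 1 and temp != num-1 else False
--         elif temp == num-1:
--             return False
--         exp >>= 1
--
-- def isPrime(num):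
--     test = [2, 325, 9375, 28178, 450775, 9780504, 1795265022]
--     for i in test:
--         if num == i:
--             return True
--         if num > 40 and millerRabin(num, i) == True:
--             return False
--     if num <= 40:
--         return False
--
--     return True
--
-- def solve(A, B):
--     primeCount = 0
--
--     # 1자리, 2자리 팰린드롬 소수 체크
--     for i in [2, 3, 5, 7, 11]:
--         if A <= i <= B:
--             primeCount += 1
--
--     # 3자리 이상의 소수 체크
--     for curL in range(max(3, len(str(A))), len(str(B))+1):
--         start = 10**((curL+1)//2 - 1)
--         end = 10**((curL+1)//2)
--
--         # 범위 내의 홀수에 대해 체크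
--         for n in range(start, end):
--             strI = str(n)
--             if int(strI[0]) % 2 == 0:
--                 continue
--
--             if curL % 2 == 0:
--                 temp = int(strI + strI[::-1])
--             else:
--                 temp = int(strI + strI[:-1][::-1])
--
--             if temp > B:
--                 break
--             if temp < A:
--                 continue
--
--             # 소수 판별
--             if isPrime(temp) == True:
--                 primeCount += 1
--
--     return primeCount
-- ===== SOURCE B (Python) =====
-- # B: single numeric scan over palindrome halves (no string slicing, no per-length loop),
-- # reusing the module's Miller-Rabin primality helper for the >=3-digit candidates.
--
-- def modPow(base, exp, MOD):
--     result = 1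
--     while exp:
--         if exp & 1:
--             result = (result*base) % MOD
--         base = (base*base) % MOD
--         exp >>= 1
--
--     return result
--
-- def millerRabin(num, base):
--     if num % base == 0:
--         return False
--
--     exp = num-1
--     while True:
--         temp = modPow(base, exp, num)
--         if exp & 1:
--             return True if temp != 1 and temp != num-1 else False
--         elif temp == num-1:
--             return False
--         exp >>= 1
--
-- def isPrime(num):
--     test = [2, 325, 9375, 28178, 450775, 9780504, 1795265022]
--     for i in test:
--         if num == i:
--             return True
--         if num > 40 and millerRabin(num, i) == True:
--             return False
--     if num <= 40:
--         return False
--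
--     return True
--
-- def _rev(m):
--     r = 0
--     while m > 0:
--         r = r * 10 + m % 10
--         m //= 10
--     return r
--
-- def solve(A, B):
--     count = 0
--     for p in (2, 3, 5, 7, 11):   # the only palindromic primes below 100
--         if A <= p <= B:
--             count += 1
--     n = 10                       # half of the palindrome (its leading digits)
--     hi = 100                     # 10 ** (number of digits of n), maintained numerically
--     while True:
--         low = hi // 10
--         odd_pal = n * low + _rev(n // 10)    # odd-length palindrome built from n
--         if odd_pal > B:                      # odd_pal grows with n: nothing further fits
--             break
--         if (n // low) % 2 == 1:              # even leading digit -> even palindrome, composite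
--             if A <= odd_pal and isPrime(odd_pal):
--                 count += 1
--             even_pal = n * hi + _rev(n)      # even-length palindrome built from n
--             if A <= even_pal <= B and isPrime(even_pal):
--                 count += 1
--         n += 1
--         if n == hi:
--             hi *= 10
--     return count
-- ===== Notes on version B (the rewrite author's own statement) =====
-- stated objective: alternative
-- what changed: Replaces A's nested per-digit-length loops over string-sliced half ranges (with break/continue and len(str(..)) bookkeeping) by a single numeric while-scan over palindrome halves that builds both the odd- and even-length palindrome arithmetically (digit reversal by div/mod, no strings) and stops once the odd palindrome exceeds B; the module's Miller-Rabin primality helper is reused unchanged.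
-- intended difference: For A <= -100 (so str(A) has 4+ characters counting the minus sign) and B >= 101, A starts its length loop at len(str(A)) and silently skips every shorter palindromic prime (at least 101), e.g. A returns 5 on (-100, 101); B returns 6, the true count of palindromic primes in [A, B], which is the intended value. — e.g. on solve(-100, 101): A returns 5, B returns 6
import Mathlib
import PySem

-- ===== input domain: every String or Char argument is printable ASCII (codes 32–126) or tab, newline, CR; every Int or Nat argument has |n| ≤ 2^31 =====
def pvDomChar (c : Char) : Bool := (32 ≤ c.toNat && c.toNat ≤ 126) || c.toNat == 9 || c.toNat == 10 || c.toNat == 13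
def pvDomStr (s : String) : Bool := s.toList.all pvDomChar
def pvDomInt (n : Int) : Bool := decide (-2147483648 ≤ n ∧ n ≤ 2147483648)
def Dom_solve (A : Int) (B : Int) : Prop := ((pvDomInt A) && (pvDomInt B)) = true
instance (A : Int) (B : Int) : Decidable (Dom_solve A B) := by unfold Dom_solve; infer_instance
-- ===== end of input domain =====

-- B (this file's re-implementation) replaces A's nested per-digit-length string loops by one numeric
-- scan over palindrome halves; the Miller-Rabin helpers are the module's own, shared by both programs.

-- ===== PORT A =====

-- int(s): hand-ported decimal evaluator, exact for the non-empty all-digit strings built below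
-- (no sign, no whitespace, no underscores ever occur there).
def pyIntDigits (cs : List Char) : Int :=
  cs.foldl (fun a c => 10 * a + ((c.toNat : Int) - 48)) 0

-- modPow's 'while exp:' loop; exp is never negative on the inputs reached from solve, and the
-- fuel (first argument, exp.toNat + 1 at the call) outlasts the halving, so it never runs out.
def modPowLoop (MOD : Int) : Nat → Int → Int → Int → Int
  | 0, result, _, _ => result
  | fuel + 1, result, base, exp =>
    if exp ≤ 0 then result
    else
      modPowLoop MOD fuel
        (if PySem.Int.band exp 1 ≠ 0 then PySem.Int.mod (result * base) MOD else result)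
        (PySem.Int.mod (base * base) MOD) (exp >>> (1 : Nat))

def modPowA (base exp MOD : Int) : Int := modPowLoop MOD (exp.toNat + 1) 1 base exp

-- millerRabin's 'while True:' loop; for num ≥ 2 Python returns before exp reaches 0, so the
-- 'exp ≤ 0' guard and the fuel (exp.toNat + 1 at the call, outlasting the halving) are totality only.
def mrLoop (num base : Int) : Nat → Int → Bool
  | 0, _ => false
  | fuel + 1, exp =>
    if exp ≤ 0 then false
    else
      let temp := modPowA base exp num
      if PySem.Int.band exp 1 ≠ 0 then decide (temp ≠ 1 ∧ temp ≠ num - 1)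
      else if temp = num - 1 then false
      else mrLoop num base fuel (exp >>> (1 : Nat))

def millerRabinA (num base : Int) : Bool :=
  if PySem.Int.mod num base = 0 then false
  else mrLoop num base ((num - 1).toNat + 1) (num - 1)

-- isPrime's 'for i in test:' loop with its early returns.
def isPrimeGo (num : Int) : List Int → Bool
  | [] => if num ≤ 40 then false else true
  | i :: rest =>
    if num = i then true
    else if num > 40 && millerRabinA num i then false
    else isPrimeGo num rest

def isPrimeA (num : Int) : Bool :=
  isPrimeGo num [2, 325, 9375, 28178, 450775, 9780504, 1795265022]

-- solve's inner 'for n in range(start, end):' loop, with its continue/break/continue.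
def innerA (A B curL : Int) : List Int → Int → Int
  | [], acc => acc
  | n :: rest, acc =>
    let strI := PySem.Int.toChars n
    -- strI is non-empty (n ≥ 10 here), so strI[0] never raises; .getD is dead
    if PySem.Int.mod (pyIntDigits [(PySem.List.pyGet? strI 0).getD '0']) 2 = 0 then
      innerA A B curL rest acc
    else
      let temp :=
        if PySem.Int.mod curL 2 = 0 then
          pyIntDigits (strI ++ (PySem.List.slice? strI none none (-1)).getD [])
        else
          pyIntDigits (strI ++ (PySem.List.slice? (PySem.List.slice strI none (some (-1))) none none (-1)).getD [])
      if temp > B then acc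
      else if temp < A then innerA A B curL rest acc
      else if isPrimeA temp then innerA A B curL rest (acc + 1)
      else innerA A B curL rest acc

-- solve's outer 'for curL in range(...):' loop.
def outerA (A B : Int) : List Int → Int → Int
  | [], acc => acc
  | curL :: rest, acc =>
    let h := PySem.Int.floordiv (curL + 1) 2
    -- curL ≥ 3 on every element produced below, so the exponents h-1, h are ≥ 1 (no float 10**-k)
    let start := (10 : Int) ^ (h - 1).toNat
    let stop := (10 : Int) ^ h.toNat
    outerA A B rest (innerA A B curL (PySem.List.pyRange start stop) acc)

def solve (A : Int) (B : Int) : Int :=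
  let primeCount : Int :=
    [2, 3, 5, 7, 11].foldl (fun acc i => if A ≤ i ∧ i ≤ B then acc + 1 else acc) 0
  let lenA : Int := ((PySem.Int.toChars A).length : Int)
  let lenB : Int := ((PySem.Int.toChars B).length : Int)
  outerA A B (PySem.List.pyRange (max 3 lenA) (lenB + 1)) primeCount

-- ===== PORT B =====

-- _rev's 'while m > 0:' loop (numeric digit reversal); the fuel (m.toNat at the call)
-- outlasts the division by 10, so it never runs out.
def revLoop : Nat → Int → Int → Int
  | 0, r, _ => r
  | fuel + 1, r, m =>
    if 0 < m then revLoop fuel (r * 10 + PySem.Int.mod m 10) (PySem.Int.floordiv m 10) else r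

def revA (m : Int) : Int := revLoop m.toNat 0 m

-- solve's 'while True:' scan over palindrome halves n; the loop breaks by n = B+1 at the
-- latest (odd_pal ≥ n), so the fuel (first argument) never runs out as called from solve_alt.
def loopB (A B : Int) : Nat → Int → Int → Int → Int
  | 0, count, _, _ => count
  | fuel + 1, count, n, hi =>
    let low := PySem.Int.floordiv hi 10
    let odd_pal := n * low + revA (PySem.Int.floordiv n 10)
    if odd_pal > B then count
    else
      let count1 :=
        if PySem.Int.mod (PySem.Int.floordiv n low) 2 = 1 then
          let c1 := if A ≤ odd_pal ∧ isPrimeA odd_pal then count + 1 else count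
          let even_pal := n * hi + revA n
          if A ≤ even_pal ∧ even_pal ≤ B ∧ isPrimeA even_pal then c1 + 1 else c1
        else count
      let n' := n + 1
      loopB A B fuel count1 n' (if n' = hi then hi * 10 else hi)

def solve_alt (A : Int) (B : Int) : Int :=
  let count : Int :=
    [2, 3, 5, 7, 11].foldl (fun acc p => if A ≤ p ∧ p ≤ B then acc + 1 else acc) 0
  loopB A B (B.toNat + 1) count 10 100

-- ===== PRECONDITION & SPEC =====

-- For A ≤ -100 (str(A) has ≥ 4 characters, the '-' included) and B ≥ 101, A starts its
-- digit-length loop at len(str(A)) and so silently skips every shorter palindromic prime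
-- (101 at least); B returns the true count of palindromic primes in [A,B], the intended value.
def D_solve (A : Int) (B : Int) : Prop := A ≤ -100 ∧ 101 ≤ B
instance (A : Int) (B : Int) : Decidable (D_solve A B) := by unfold D_solve; infer_instance

def Spec_solve (A : Int) (B : Int) (out : Int) : Prop := ¬ D_solve A B → out = solve_alt A B
instance (A : Int) (B : Int) (out : Int) : Decidable (Spec_solve A B out) := by
  unfold Spec_solve; infer_instance

def pvDiffWitness_solve : Int × Int := (-100, 101)
def pvDiffWitnessOut_solve : Int × Int := (5, 6)

-- ===== CLAIM (what is proved, stated in full; the proofs are below) =====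
def Claim_unchanged_solve : Prop := ∀ (A : Int) (B : Int), Dom_solve A B → Spec_solve A B (solve A B)
def Claim_changed_solve : Prop := Dom_solve (pvDiffWitness_solve.1) (pvDiffWitness_solve.2) ∧ D_solve (pvDiffWitness_solve.1) (pvDiffWitness_solve.2) ∧ solve (pvDiffWitness_solve.1) (pvDiffWitness_solve.2) = pvDiffWitnessOut_solve.1 ∧ solve_alt (pvDiffWitness_solve.1) (pvDiffWitness_solve.2) = pvDiffWitnessOut_solve.2 ∧ pvDiffWitnessOut_solve.1 ≠ pvDiffWitnessOut_solve.2
def Claim_exact_solve : Prop := ∀ (A : Int) (B : Int), Dom_solve A B → D_solve A B → solve A B ≠ solve_alt A B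

-- ===== LEMMAS AND PROOFS =====

-- ---------- decimal strings: value and length ----------

-- digit count of n (length of str(n) for n ≥ 0)
def dN (n : Nat) : Nat := (Nat.toDigits 10 n).length

-- value of the reversed decimal string of n
def rv (n : Nat) : Int := pyIntDigits (Nat.toDigits 10 n).reverse

lemma pyIntDigits_acc (cs : List Char) (a : Int) :
    cs.foldl (fun a c => 10 * a + ((c.toNat : Int) - 48)) a = a * 10 ^ cs.length + pyIntDigits cs := by
  induction cs generalizing a with
  | nil => simp [pyIntDigits]
  | cons c cs ih =>
    simp only [List.foldl_cons, pyIntDigits, List.length_cons]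
    rw [ih, ih ((10:Int) * 0 + ((c.toNat : Int) - 48))]
    ring

lemma pyIntDigits_cons (c : Char) (cs : List Char) :
    pyIntDigits (c :: cs) = ((c.toNat : Int) - 48) * 10 ^ cs.length + pyIntDigits cs := by
  have h : pyIntDigits (c :: cs)
      = cs.foldl (fun a c => 10 * a + ((c.toNat : Int) - 48)) (10 * 0 + ((c.toNat : Int) - 48)) := rfl
  rw [h, pyIntDigits_acc]
  ring

lemma pyIntDigits_append (xs ys : List Char) :
    pyIntDigits (xs ++ ys) = pyIntDigits xs * 10 ^ ys.length + pyIntDigits ys := by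
  have h : pyIntDigits (xs ++ ys)
      = ys.foldl (fun a c => 10 * a + ((c.toNat : Int) - 48)) (pyIntDigits xs) := by
    simp [pyIntDigits, List.foldl_append]
  rw [h, pyIntDigits_acc]

lemma isDigit_bounds {c : Char} (h : c.isDigit) : 48 ≤ c.toNat ∧ c.toNat ≤ 57 := by
  simp only [Char.isDigit, decide_eq_true_eq, Bool.and_eq_true] at h
  rcases h with ⟨h1, h2⟩
  constructor <;> simpa using ‹_›

lemma pyIntDigits_bounds {cs : List Char} (h : ∀ c ∈ cs, c.isDigit) :
    0 ≤ pyIntDigits cs ∧ pyIntDigits cs < 10 ^ cs.length := by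
  induction cs with
  | nil => simp [pyIntDigits]
  | cons c cs ih =>
    have hc := isDigit_bounds (h c (by simp))
    have ihb := ih (fun x hx => h x (by simp [hx]))
    rw [pyIntDigits_cons]
    have hp : (0:Int) < 10 ^ cs.length := by positivity
    constructor
    · nlinarith [ihb.1, hc.1]
    · have : ((c.toNat : Int) - 48) ≤ 9 := by omega
      calc ((c.toNat : Int) - 48) * 10 ^ cs.length + pyIntDigits cs
          < ((c.toNat : Int) - 48) * 10 ^ cs.length + 10 ^ cs.length := by linarith [ihb.2]
        _ = (((c.toNat : Int) - 48) + 1) * 10 ^ cs.length := by ring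
        _ ≤ 10 * 10 ^ cs.length := by nlinarith
        _ = 10 ^ (cs.length + 1) := by ring


lemma toDigits_digits (n : Nat) : ∀ c ∈ Nat.toDigits 10 n, c.isDigit := by
  intro c hc
  exact Nat.isDigit_of_mem_toDigits (by norm_num) (by norm_num) hc

lemma dN_pos (n : Nat) : 1 ≤ dN n := Nat.length_toDigits_pos

lemma dN_le_iff {n k : Nat} (hk : 0 < k) : dN n ≤ k ↔ n < 10 ^ k :=
  Nat.length_toDigits_le_iff (by norm_num) hk

lemma lt_pow_dN (n : Nat) : n < 10 ^ dN n := (dN_le_iff (dN_pos n)).1 le_rfl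

lemma pow_dN_le {n : Nat} (hn : 1 ≤ n) : 10 ^ (dN n - 1) ≤ n := by
  by_contra h
  push_neg at h
  rcases Nat.eq_or_lt_of_le (dN_pos n) with h1 | h1
  · simp [← h1] at h; omega
  · have : dN n ≤ dN n - 1 := (dN_le_iff (by omega)).2 h
    omega

lemma dN_eq_iff {n h : Nat} (hn : 1 ≤ n) (hh : 1 ≤ h) :
    dN n = h ↔ 10 ^ (h - 1) ≤ n ∧ n < 10 ^ h := by
  constructor
  · rintro rfl
    exact ⟨pow_dN_le hn, lt_pow_dN n⟩
  · rintro ⟨h1, h2⟩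
    have ha : dN n ≤ h := (dN_le_iff hh).2 h2
    have hb : ¬ (dN n ≤ h - 1) := by
      rcases Nat.eq_or_lt_of_le hh with h3 | h3
      · have := dN_pos n; omega
      · intro hc
        have := (dN_le_iff (k := h - 1) (by omega)).1 hc
        omega
    omega

lemma val_toDigits (n : Nat) : pyIntDigits (Nat.toDigits 10 n) = (n : Int) := by
  induction n using Nat.strong_induction_on with
  | _ n ih =>
    rcases Nat.lt_or_ge n 10 with h | h
    · rw [Nat.toDigits_of_lt_base h]
      interval_cases n <;> decide
    · rw [Nat.toDigits_of_base_le (by norm_num) h, pyIntDigits_append]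
      rw [ih (n / 10) (by omega)]
      have h9 : n % 10 < 10 := by omega
      have : pyIntDigits [(n % 10).digitChar] = ((n % 10 : Nat) : Int) := by
        set r := n % 10 with hr
        interval_cases r <;> decide
      rw [this]
      simp only [List.length_cons, List.length_nil, pow_one]
      push_cast
      omega

lemma dN_two_le {n : Nat} (h : 10 ≤ n) : 2 ≤ dN n := by
  by_contra hc
  have := (dN_le_iff (n := n) (k := 1) (by omega)).1 (by omega)
  omega

lemma dN_div10 {n : Nat} (h : 10 ≤ n) : dN (n / 10) = dN n - 1 := by
  have h2 : 2 ≤ dN n := dN_two_le h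
  obtain ⟨e, he⟩ : ∃ e, dN n = e + 2 := ⟨dN n - 2, by omega⟩
  have hb := (dN_eq_iff (n := n) (h := dN n) (by omega) (by omega)).1 rfl
  rw [he] at hb ⊢
  have hlo : 10 ^ e ≤ n / 10 := by
    rw [Nat.le_div_iff_mul_le (by norm_num)]
    calc 10 ^ e * 10 = 10 ^ (e + 1) := by ring
      _ ≤ n := by simpa using hb.1
  have hhi : n / 10 < 10 ^ (e + 1) := by
    rw [Nat.div_lt_iff_lt_mul (by norm_num)]
    calc n < 10 ^ (e + 2) := hb.2
      _ = 10 ^ (e + 1) * 10 := by ring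
  have : dN (n / 10) = e + 1 :=
    (dN_eq_iff (n := n / 10) (by omega) (by omega)).2 ⟨by simpa using hlo, hhi⟩
  omega

lemma toDigits_dropLast {n : Nat} (h : 10 ≤ n) :
    (Nat.toDigits 10 n).dropLast = Nat.toDigits 10 (n / 10) := by
  rw [Nat.toDigits_of_base_le (by norm_num) h]
  simp


-- ---------- the numeric reversal loop vs the reversed string ----------

lemma rv_small {m : Nat} (h : m < 10) : rv m = (m : Int) := by
  unfold rv
  rw [Nat.toDigits_of_lt_base h]
  have := val_toDigits m
  rw [Nat.toDigits_of_lt_base h] at this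
  simpa using this

lemma rv_step {m : Nat} (h : 10 ≤ m) :
    rv m = ((m % 10 : Nat) : Int) * 10 ^ dN (m / 10) + rv (m / 10) := by
  unfold rv
  rw [Nat.toDigits_of_base_le (by norm_num) h]
  rw [List.reverse_append]
  simp only [List.reverse_cons, List.reverse_nil, List.nil_append, List.cons_append,
    List.nil_append]
  rw [pyIntDigits_cons]
  have hr : m % 10 < 10 := by omega
  have hv : (((m % 10).digitChar).toNat : Int) - 48 = ((m % 10 : Nat) : Int) := by
    set r := m % 10 with hrr
    interval_cases r <;> decide
  rw [hv, List.length_reverse]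
  rfl

lemma revLoop_zero (f : Nat) (r : Int) : revLoop f r 0 = r := by
  cases f <;> simp [revLoop]

lemma revLoop_eq : ∀ (f : Nat) (m : Nat) (r : Int), 1 ≤ m → m < 10 ^ f →
    revLoop f r (m : Int) = r * 10 ^ dN m + rv m := by
  intro f
  induction f with
  | zero => intro m r h1 h2; omega
  | succ f ih =>
    intro m r h1 h2
    have hpos : (0:Int) < (m:Int) := by exact_mod_cast h1
    simp only [revLoop, if_pos hpos]
    have hmod : PySem.Int.mod ((m : Nat) : Int) 10 = ((m % 10 : Nat) : Int) := by
      exact_mod_cast PySem.Int.mod_natCast m 10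
    have hdiv2 : PySem.Int.floordiv ((m : Nat) : Int) 10 = ((m / 10 : Nat) : Int) := by
      exact_mod_cast PySem.Int.floordiv_natCast m 10
    rw [hmod, hdiv2]
    rcases Nat.lt_or_ge m 10 with hm | hm
    · have hdiv : m / 10 = 0 := by omega
      rw [hdiv]
      simp only [Nat.cast_zero, revLoop_zero]
      have hd1 : dN m = 1 := (dN_eq_iff h1 le_rfl).2 ⟨by simpa using h1, by simpa using hm⟩
      have hmm : m % 10 = m := Nat.mod_eq_of_lt hm
      rw [hd1, rv_small hm, hmm, pow_one]
    · have hdge : 1 ≤ m / 10 := by omega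
      have hdlt : m / 10 < 10 ^ f := by
        rw [Nat.div_lt_iff_lt_mul (by norm_num)]
        calc m < 10 ^ (f + 1) := h2
          _ = 10 ^ f * 10 := by ring
      rw [ih (m / 10) _ hdge hdlt]
      have hdd : dN m = dN (m / 10) + 1 := by
        have := dN_div10 hm
        have := dN_two_le hm
        omega
      rw [rv_step hm, hdd]
      push_cast
      ring

lemma revA_eq {m : Nat} (h : 1 ≤ m) : revA ((m : Nat) : Int) = rv m := by
  unfold revA
  have ht : ((m : Nat) : Int).toNat = m := by simp
  rw [ht, revLoop_eq m m 0 h (Nat.lt_pow_self (by norm_num))]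
  simp

lemma rv_bounds (m : Nat) : 0 ≤ rv m ∧ rv m < 10 ^ dN m := by
  have hd : ∀ c ∈ (Nat.toDigits 10 m).reverse, c.isDigit := by
    intro c hc
    exact toDigits_digits m c (by simpa using hc)
  have := pyIntDigits_bounds hd
  simpa [rv, dN] using this

-- head digit of the decimal string
lemma toDigits_head {m : Nat} (h : 1 ≤ m) :
    ∃ c cs, Nat.toDigits 10 m = c :: cs ∧
      ((c.toNat : Int) - 48) = ((m / 10 ^ (dN m - 1) : Nat) : Int) ∧ cs.length = dN m - 1 := by
  obtain ⟨c, cs, hcc⟩ : ∃ c cs, Nat.toDigits 10 m = c :: cs := by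
    have := dN_pos m
    cases hh : Nat.toDigits 10 m with
    | nil => rw [dN, hh] at this; simp at this
    | cons c cs => exact ⟨c, cs, rfl⟩
  have hlen : cs.length = dN m - 1 := by
    have : dN m = cs.length + 1 := by rw [dN, hcc]; simp
    omega
  have hval := val_toDigits m
  rw [hcc, pyIntDigits_cons] at hval
  have hdig : ∀ x ∈ cs, x.isDigit := fun x hx => toDigits_digits m x (by rw [hcc]; simp [hx])
  have hb := pyIntDigits_bounds hdig
  refine ⟨c, cs, hcc, ?_, hlen⟩
  have hK : (0:Int) < 10 ^ cs.length := by positivity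
  have hq : (m : Int) / 10 ^ cs.length = ((c.toNat : Int) - 48) := by
    rw [← hval]
    rw [add_comm, Int.add_mul_ediv_right _ _ (by positivity : (10:Int) ^ cs.length ≠ 0)]
    rw [Int.ediv_eq_zero_of_lt hb.1 hb.2]
    ring
  rw [← hq, hlen, Int.natCast_ediv]
  push_cast
  rfl

lemma lead_pos {m : Nat} (h : 1 ≤ m) : 1 ≤ m / 10 ^ (dN m - 1) := by
  have := pow_dN_le h
  exact (Nat.le_div_iff_mul_le (by positivity)).2 (by omega)

lemma rv_pos {m : Nat} (h : 1 ≤ m) : 1 ≤ rv m := by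
  obtain ⟨c, cs, hcc, hcv, _⟩ := toDigits_head h
  have hlead := lead_pos h
  have hdig : ∀ x ∈ cs.reverse, x.isDigit := by
    intro x hx
    exact toDigits_digits m x (by rw [hcc]; simp at hx; simp [hx])
  have hb := pyIntDigits_bounds hdig
  unfold rv
  rw [hcc, List.reverse_cons, pyIntDigits_append]
  have h1 : pyIntDigits [c] = (c.toNat : Int) - 48 := by
    simp [pyIntDigits]
  have : (1:Int) ≤ (c.toNat : Int) - 48 := by
    rw [hcv]; exact_mod_cast hlead
  have hlen1 : ([c] : List Char).length = 1 := rfl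
  rw [hlen1, pow_one, h1]
  linarith [hb.1, this]


-- ---------- the two palindromes built from a half m, and their counting indicators ----------

def leadD (m : Nat) : Nat := m / 10 ^ (dN m - 1)

def opalN (m : Nat) : Int := (m : Int) * 10 ^ (dN m - 1) + rv (m / 10)

def epalN (m : Nat) : Int := (m : Int) * 10 ^ dN m + rv m

def oC (A B : Int) (m : Nat) : Int :=
  if leadD m % 2 = 1 ∧ A ≤ opalN m ∧ opalN m ≤ B ∧ isPrimeA (opalN m) = true then 1 else 0

def eC (A B : Int) (m : Nat) : Int :=
  if leadD m % 2 = 1 ∧ A ≤ epalN m ∧ epalN m ≤ B ∧ isPrimeA (epalN m) = true then 1 else 0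

-- the per-length inner sum of A's loop (ℓ = palindrome length)
def SL (A B : Int) (l : Nat) : Int :=
  ∑ m ∈ Finset.Ico (10 ^ ((l + 1) / 2 - 1)) (10 ^ ((l + 1) / 2)),
    (if l % 2 = 0 then eC A B m else oC A B m)

lemma dN_mono {m m' : Nat} (h : m ≤ m') : dN m ≤ dN m' :=
  (dN_le_iff (dN_pos m')).2 (lt_of_le_of_lt h (lt_pow_dN m'))

lemma cast_bounds {m : Nat} (hm : 10 ≤ m) :
    (10:Int) ^ (dN m - 1) ≤ (m : Int) ∧ (m : Int) < 10 ^ dN m := by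
  constructor
  · exact_mod_cast pow_dN_le (by omega)
  · exact_mod_cast lt_pow_dN m

lemma rv_div_bounds {m : Nat} (hm : 10 ≤ m) :
    1 ≤ rv (m / 10) ∧ rv (m / 10) < 10 ^ (dN m - 1) := by
  have h1 : 1 ≤ m / 10 := by omega
  have h2 := rv_bounds (m / 10)
  rw [dN_div10 hm] at h2
  exact ⟨rv_pos h1, h2.2⟩

lemma rv_m_bounds {m : Nat} (hm : 10 ≤ m) : 1 ≤ rv m ∧ rv m < 10 ^ dN m :=
  ⟨rv_pos (by omega), (rv_bounds m).2⟩

lemma dN_decomp {m : Nat} (hm : 10 ≤ m) :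
    ∃ e, dN m = e + 2 ∧ (10:Int) ^ (e + 1) ≤ (m : Int) ∧ (m : Int) < 10 ^ (e + 2) ∧
      1 ≤ rv (m / 10) ∧ rv (m / 10) < 10 ^ (e + 1) ∧ 1 ≤ rv m ∧ rv m < 10 ^ (e + 2) ∧
      opalN m = (m : Int) * 10 ^ (e + 1) + rv (m / 10) ∧
      epalN m = (m : Int) * 10 ^ (e + 2) + rv m := by
  obtain ⟨e, he⟩ : ∃ e, dN m = e + 2 := ⟨dN m - 2, by have := dN_two_le hm; omega⟩
  have h2 : dN m - 1 = e + 1 := by omega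
  have hc := cast_bounds hm
  rw [h2] at hc
  rw [he] at hc
  have hr := rv_div_bounds hm
  rw [h2] at hr
  have hr2 := rv_m_bounds hm
  rw [he] at hr2
  refine ⟨e, he, hc.1, hc.2, hr.1, hr.2, hr2.1, hr2.2, ?_, ?_⟩
  · unfold opalN; rw [h2]
  · unfold epalN; rw [he]

lemma opal_lb {m : Nat} (hm : 10 ≤ m) : (10:Int) ^ (2 * dN m - 2) < opalN m := by
  obtain ⟨e, he, hc1, hc2, hr1, hr2, hs1, hs2, ho, hp⟩ := dN_decomp hm
  rw [he, show 2 * (e + 2) - 2 = (e + 1) + (e + 1) from by omega, pow_add, ho]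
  have hP : (0:Int) < 10 ^ (e + 1) := by positivity
  nlinarith

lemma opal_ub {m : Nat} (hm : 10 ≤ m) : opalN m < 10 ^ (2 * dN m - 1) := by
  obtain ⟨e, he, hc1, hc2, hr1, hr2, hs1, hs2, ho, hp⟩ := dN_decomp hm
  rw [he, show 2 * (e + 2) - 1 = (e + 2) + (e + 1) from by omega, pow_add, ho]
  have hP : (0:Int) < 10 ^ (e + 1) := by positivity
  nlinarith

lemma epal_lb {m : Nat} (hm : 10 ≤ m) : (10:Int) ^ (2 * dN m - 1) ≤ epalN m := by
  obtain ⟨e, he, hc1, hc2, hr1, hr2, hs1, hs2, ho, hp⟩ := dN_decomp hm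
  rw [he, show 2 * (e + 2) - 1 = (e + 1) + (e + 2) from by omega, pow_add, hp]
  have hP : (0:Int) < 10 ^ (e + 2) := by positivity
  nlinarith

lemma epal_ub {m : Nat} (hm : 10 ≤ m) : epalN m < 10 ^ (2 * dN m) := by
  obtain ⟨e, he, hc1, hc2, hr1, hr2, hs1, hs2, ho, hp⟩ := dN_decomp hm
  rw [he, show 2 * (e + 2) = (e + 2) + (e + 2) from by omega, pow_add, hp]
  have hP : (0:Int) < 10 ^ (e + 2) := by positivity
  nlinarith

lemma opal_ge {m : Nat} (hm : 10 ≤ m) : (m : Int) ≤ opalN m := by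
  obtain ⟨e, he, hc1, hc2, hr1, hr2, hs1, hs2, ho, hp⟩ := dN_decomp hm
  rw [ho]
  have hP : (1:Int) ≤ 10 ^ (e + 1) := one_le_pow₀ (by norm_num)
  have hm' : (0:Int) ≤ (m : Int) := by positivity
  nlinarith

lemma opal_ge_101 {m : Nat} (hm : 10 ≤ m) : 101 ≤ opalN m := by
  obtain ⟨e, he, hc1, hc2, hr1, hr2, hs1, hs2, ho, hp⟩ := dN_decomp hm
  rw [ho]
  have hP : (10:Int) ≤ 10 ^ (e + 1) := by
    calc (10:Int) = 10 ^ 1 := by norm_num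
      _ ≤ 10 ^ (e + 1) := pow_le_pow_right₀ (by norm_num) (by omega)
  have hm' : (10:Int) ≤ (m : Int) := by exact_mod_cast hm
  nlinarith

lemma opal_le_epal {m : Nat} (hm : 10 ≤ m) : opalN m ≤ epalN m := by
  have h1 := opal_ub hm
  have h2 := epal_lb hm
  omega

lemma opal_mono {m m' : Nat} (hm : 10 ≤ m) (h : m ≤ m') : opalN m ≤ opalN m' := by
  rcases Nat.eq_or_lt_of_le (dN_mono h) with hd | hd
  · rcases Nat.eq_or_lt_of_le h with rfl | hlt
    · exact le_refl _
    · obtain ⟨e, he, hc1, hc2, hr1, hr2, hs1, hs2, ho, hp⟩ := dN_decomp hm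
      obtain ⟨e', he', hc1', hc2', hr1', hr2', hs1', hs2', ho', hp'⟩ :=
        dN_decomp (by omega : 10 ≤ m')
      have hee : e' = e := by omega
      rw [ho, ho', hee]
      rw [hee] at hr2' hc1' hc2'
      have hc : (m : Int) + 1 ≤ (m' : Int) := by exact_mod_cast hlt
      have hP : (0:Int) < 10 ^ (e + 1) := by positivity
      nlinarith
  · have h1 := opal_ub hm
    have h2 := opal_lb (by omega : 10 ≤ m')
    have h3 : (10:Int) ^ (2 * dN m - 1) ≤ 10 ^ (2 * dN m' - 2) := by
      apply pow_le_pow_right₀ (by norm_num)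
      have := dN_two_le hm
      omega
    omega

lemma epal_mono_same {m m' : Nat} (hm : 10 ≤ m) (h : m ≤ m') (hd : dN m = dN m') :
    epalN m ≤ epalN m' := by
  rcases Nat.eq_or_lt_of_le h with rfl | hlt
  · exact le_refl _
  · obtain ⟨e, he, hc1, hc2, hr1, hr2, hs1, hs2, ho, hp⟩ := dN_decomp hm
    obtain ⟨e', he', hc1', hc2', hr1', hr2', hs1', hs2', ho', hp'⟩ :=
      dN_decomp (by omega : 10 ≤ m')
    have hee : e' = e := by omega
    rw [hp, hp', hee]
    rw [hee] at hs2' hc1' hc2'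
    have hc : (m : Int) + 1 ≤ (m' : Int) := by exact_mod_cast hlt
    have hP : (0:Int) < 10 ^ (e + 2) := by positivity
    nlinarith


-- ---------- bridging A's per-candidate string computations to the numeric palindromes ----------

lemma toChars_natCast (m : Nat) : PySem.Int.toChars ((m : Nat) : Int) = Nat.toDigits 10 m := by
  simp [PySem.Int.toChars]

lemma stepA {m : Nat} (hm : 10 ≤ m) :
    ∃ c cs, PySem.Int.toChars ((m : Nat) : Int) = c :: cs ∧
      pyIntDigits [c] = ((leadD m : Nat) : Int) ∧
      pyIntDigits ((c :: cs) ++ (PySem.List.slice? (c :: cs) none none (-1)).getD []) = epalN m ∧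
      pyIntDigits ((c :: cs) ++
        (PySem.List.slice? (PySem.List.slice (c :: cs) none (some (-1))) none none (-1)).getD [])
        = opalN m := by
  obtain ⟨c, cs, hcc, hcv, hlen⟩ := toDigits_head (by omega : 1 ≤ m)
  refine ⟨c, cs, by rw [toChars_natCast, hcc], ?_, ?_, ?_⟩
  · have h1 : pyIntDigits [c] = (c.toNat : Int) - 48 := by simp [pyIntDigits]
    rw [h1, hcv]
    rfl
  · rw [PySem.List.slice?_none_none_neg_one]
    simp only [Option.getD_some]
    rw [pyIntDigits_append, List.length_reverse, ← hcc, val_toDigits]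
    have : (Nat.toDigits 10 m).length = dN m := rfl
    rw [this]
    rfl
  · rw [PySem.List.slice_to_neg_one, ← hcc, toDigits_dropLast hm,
      PySem.List.slice?_none_none_neg_one]
    simp only [Option.getD_some]
    rw [pyIntDigits_append, List.length_reverse, val_toDigits]
    have h3 : (Nat.toDigits 10 (m / 10)).length = dN m - 1 := dN_div10 hm
    rw [h3]
    rfl

lemma pyGet?_zero (c : Char) (cs : List Char) : PySem.List.pyGet? (c :: cs) 0 = some c := by
  simp [pysem]

lemma mod2_natCast_eq_zero (x : Nat) : PySem.Int.mod ((x : Nat) : Int) 2 = 0 ↔ x % 2 = 0 := by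
  have h : PySem.Int.mod ((x : Nat) : Int) 2 = ((x % 2 : Nat) : Int) := by
    exact_mod_cast PySem.Int.mod_natCast x 2
  rw [h]
  omega

lemma mod2_natCast_eq_one (x : Nat) : PySem.Int.mod ((x : Nat) : Int) 2 = 1 ↔ x % 2 = 1 := by
  have h : PySem.Int.mod ((x : Nat) : Int) 2 = ((x % 2 : Nat) : Int) := by
    exact_mod_cast PySem.Int.mod_natCast x 2
  rw [h]
  omega

-- A's inner loop (with its break) equals the closed per-length sum
lemma innerA_eq (A B : Int) (l : Nat) (hl3 : 3 ≤ l) :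
    ∀ (k a : Nat) (acc : Int), 10 ^ ((l + 1) / 2 - 1) ≤ a → 10 ^ ((l + 1) / 2) - a ≤ k →
      innerA A B ((l : Nat) : Int) (PySem.List.pyRange ((a : Nat) : Int) ((10 ^ ((l + 1) / 2) : Nat) : Int)) acc
        = acc + ∑ m ∈ Finset.Ico a (10 ^ ((l + 1) / 2)), (if l % 2 = 0 then eC A B m else oC A B m) := by
  set h := (l + 1) / 2 with hh
  have hh2 : 2 ≤ h := by omega
  intro k
  induction k with
  | zero =>
    intro a acc ha hk
    have : 10 ^ h ≤ a := by omega
    rw [PySem.List.pyRange_one_eq_nil (by exact_mod_cast this), Finset.Ico_eq_empty (by omega)]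
    simp [innerA]
  | succ k ih =>
    intro a acc ha hk
    rcases Nat.lt_or_ge a (10 ^ h) with hlt | hge
    swap
    · rw [PySem.List.pyRange_one_eq_nil (by exact_mod_cast hge), Finset.Ico_eq_empty (by omega)]
      simp [innerA]
    have hm10 : 10 ≤ a := le_trans (by calc (10:Nat) = 10 ^ 1 := by norm_num
      _ ≤ 10 ^ (h - 1) := Nat.pow_le_pow_right (by norm_num) (by omega)) ha
    have hda : dN a = h := (dN_eq_iff (by omega) (by omega)).2 ⟨ha, hlt⟩
    rw [PySem.List.pyRange_one_cons (by exact_mod_cast hlt)]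
    obtain ⟨c, cs, hcc, hcv, heven, hodd⟩ := stepA hm10
    have hcast : ((a : Nat) : Int) + 1 = (((a + 1 : Nat)) : Int) := by push_cast; ring
    have hrec : ∀ acc' : Int,
        innerA A B ((l : Nat) : Int) (PySem.List.pyRange (((a : Nat) : Int) + 1) ((10 ^ h : Nat) : Int)) acc'
          = acc' + ∑ m ∈ Finset.Ico (a + 1) (10 ^ h), (if l % 2 = 0 then eC A B m else oC A B m) := by
      intro acc'
      rw [hcast]
      exact ih (a + 1) acc' (by omega) (by omega)
    have hsplit : ∑ m ∈ Finset.Ico a (10 ^ h), (if l % 2 = 0 then eC A B m else oC A B m)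
        = (if l % 2 = 0 then eC A B a else oC A B a)
          + ∑ m ∈ Finset.Ico (a + 1) (10 ^ h), (if l % 2 = 0 then eC A B m else oC A B m) :=
      Finset.sum_eq_sum_Ico_succ_bot hlt _
    simp only [innerA, hcc, pyGet?_zero, Option.getD_some]
    by_cases hpar : leadD a % 2 = 0
    · -- even leading digit: skipped, and both indicators are 0
      rw [if_pos (by rw [hcv]; exact (mod2_natCast_eq_zero _).2 hpar)]
      rw [hrec acc, hsplit]
      have : (if l % 2 = 0 then eC A B a else oC A B a) = 0 := by
        split <;> · simp only [eC, oC]; rw [if_neg]; omega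
      omega
    · rw [if_neg (by rw [hcv]; intro hx; exact hpar ((mod2_natCast_eq_zero _).1 hx))]
      have hpar1 : leadD a % 2 = 1 := by omega
      -- the candidate palindrome A actually builds for this parity
      by_cases hl2 : l % 2 = 0
      · -- even length: temp = epalN a
        rw [if_pos ((mod2_natCast_eq_zero l).2 hl2), heven]
        by_cases hB : epalN a > B
        · rw [if_pos hB]
          have hz : ∀ m ∈ Finset.Ico a (10 ^ h), (if l % 2 = 0 then eC A B m else oC A B m) = 0 := by
            intro m hmm
            rw [Finset.mem_Ico] at hmm
            have hdm : dN m = h := (dN_eq_iff (by omega) (by omega)).2 ⟨by omega, hmm.2⟩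
            have : B < epalN m := lt_of_lt_of_le hB (epal_mono_same hm10 hmm.1 (by omega))
            rw [if_pos hl2]
            simp only [eC]
            rw [if_neg]
            omega
          rw [Finset.sum_eq_zero hz]
          omega
        · rw [if_neg hB]
          push_neg at hB
          by_cases hA : epalN a < A
          · rw [if_pos hA, hrec acc, hsplit, if_pos hl2]
            have : eC A B a = 0 := by simp only [eC]; rw [if_neg]; omega
            omega
          · rw [if_neg hA]
            push_neg at hA
            by_cases hpr : isPrimeA (epalN a) = true
            · rw [if_pos hpr, hrec (acc + 1), hsplit, if_pos hl2]
              have : eC A B a = 1 := by simp only [eC]; rw [if_pos ⟨hpar1, hA, hB, hpr⟩]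
              omega
            · rw [if_neg hpr, hrec acc, hsplit, if_pos hl2]
              have : eC A B a = 0 := by simp only [eC]; rw [if_neg]; tauto
              omega
      · -- odd length: temp = opalN a
        rw [if_neg (fun hx => hl2 ((mod2_natCast_eq_zero l).1 hx)), hodd]
        by_cases hB : opalN a > B
        · rw [if_pos hB]
          have hz : ∀ m ∈ Finset.Ico a (10 ^ h), (if l % 2 = 0 then eC A B m else oC A B m) = 0 := by
            intro m hmm
            rw [Finset.mem_Ico] at hmm
            have : B < opalN m := lt_of_lt_of_le hB (opal_mono hm10 hmm.1)
            rw [if_neg hl2]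
            simp only [oC]
            rw [if_neg]
            omega
          rw [Finset.sum_eq_zero hz]
          omega
        · rw [if_neg hB]
          push_neg at hB
          by_cases hA : opalN a < A
          · rw [if_pos hA, hrec acc, hsplit, if_neg hl2]
            have : oC A B a = 0 := by simp only [oC]; rw [if_neg]; omega
            omega
          · rw [if_neg hA]
            push_neg at hA
            by_cases hpr : isPrimeA (opalN a) = true
            · rw [if_pos hpr, hrec (acc + 1), hsplit, if_neg hl2]
              have : oC A B a = 1 := by simp only [oC]; rw [if_pos ⟨hpar1, hA, hB, hpr⟩]
              omega
            · rw [if_neg hpr, hrec acc, hsplit, if_neg hl2]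
              have : oC A B a = 0 := by simp only [oC]; rw [if_neg]; tauto
              omega


-- ---------- A's outer loop over palindrome lengths ----------

lemma outerA_eq (A B : Int) : ∀ (k lo hi : Nat) (acc : Int), 3 ≤ lo → hi - lo ≤ k →
    outerA A B (PySem.List.pyRange ((lo : Nat) : Int) ((hi : Nat) : Int)) acc
      = acc + ∑ l ∈ Finset.Ico lo hi, SL A B l := by
  intro k
  induction k with
  | zero =>
    intro lo hi acc h3 hk
    rw [PySem.List.pyRange_one_eq_nil (by exact_mod_cast (by omega : hi ≤ lo)),
      Finset.Ico_eq_empty (by omega)]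
    simp [outerA]
  | succ k ih =>
    intro lo hi acc h3 hk
    rcases Nat.lt_or_ge lo hi with hlt | hge
    swap
    · rw [PySem.List.pyRange_one_eq_nil (by exact_mod_cast hge), Finset.Ico_eq_empty (by omega)]
      simp [outerA]
    rw [PySem.List.pyRange_one_cons (by exact_mod_cast hlt)]
    simp only [outerA]
    have hcast1 : ((lo : Nat) : Int) + 1 = ((lo + 1 : Nat) : Int) := by push_cast; ring
    have hh : PySem.Int.floordiv (((lo : Nat) : Int) + 1) 2 = ((((lo + 1) / 2) : Nat) : Int) := by
      rw [hcast1]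
      exact_mod_cast PySem.Int.floordiv_natCast (lo + 1) 2
    rw [hh]
    have hge2 : 2 ≤ ((lo + 1) / 2) := by omega
    have ht1 : (((((lo + 1) / 2) : Nat) : Int) - 1).toNat = ((lo + 1) / 2) - 1 := by omega
    have hstart : (10 : Int) ^ ((((((lo + 1) / 2) : Nat) : Int) - 1).toNat) = ((10 ^ (((lo + 1) / 2) - 1) : Nat) : Int) := by
      rw [ht1]; push_cast; ring
    have hstop : (10 : Int) ^ (((((lo + 1) / 2) : Nat) : Int)).toNat = ((10 ^ ((lo + 1) / 2) : Nat) : Int) := by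
      have : (((((lo + 1) / 2) : Nat) : Int)).toNat = ((lo + 1) / 2) := by omega
      rw [this]; push_cast; ring
    rw [hstart, hstop]
    rw [innerA_eq A B lo h3 (10 ^ ((lo + 1) / 2)) (10 ^ (((lo + 1) / 2) - 1)) acc le_rfl (Nat.sub_le _ _)]
    rw [hcast1, ih (lo + 1) hi _ (by omega) (by omega)]
    rw [Finset.sum_eq_sum_Ico_succ_bot hlt]
    have : SL A B lo
        = ∑ m ∈ Finset.Ico (10 ^ (((lo + 1) / 2) - 1)) (10 ^ ((lo + 1) / 2)),
            (if lo % 2 = 0 then eC A B m else oC A B m) := rfl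
    rw [this]
    omega

-- ---------- regrouping the per-length sums into one scan over halves ----------

lemma regroup (A B : Int) : ∀ (H : Nat), 2 ≤ H →
    ∑ l ∈ Finset.Ico 3 (2 * H + 1), SL A B l
      = ∑ m ∈ Finset.Ico 10 (10 ^ H), (oC A B m + eC A B m) := by
  intro H
  induction H with
  | zero => omega
  | succ H ih =>
    intro hH
    rcases Nat.lt_or_ge H 2 with h2 | h2
    · -- H + 1 = 2
      have hH2 : H = 1 := by omega
      subst hH2
      have e1 : 2 * (1 + 1) + 1 = 5 := by norm_num
      have e2 : (10:Nat) ^ (1 + 1) = 100 := by norm_num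
      rw [e1, e2]
      have h34 : Finset.Ico 3 5 = {3, 4} := by decide
      rw [h34]
      rw [Finset.sum_insert (by decide), Finset.sum_singleton]
      have hS3 : SL A B 3 = ∑ m ∈ Finset.Ico 10 100, oC A B m := by
        unfold SL; norm_num
      have hS4 : SL A B 4 = ∑ m ∈ Finset.Ico 10 100, eC A B m := by
        unfold SL; norm_num
      rw [hS3, hS4, Finset.sum_add_distrib]
    · have step1 : 2 * (H + 1) + 1 = (2 * H + 1) + 1 + 1 := by omega
      rw [step1]
      rw [Finset.sum_Ico_succ_top (by omega), Finset.sum_Ico_succ_top (by omega)]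
      rw [ih h2]
      have h10H : (10:Nat) ≤ 10 ^ H := by
        calc (10:Nat) = 10 ^ 1 := by norm_num
          _ ≤ 10 ^ H := Nat.pow_le_pow_right (by norm_num) (by omega)
      have hsplit : Finset.Ico 10 (10 ^ (H + 1)) = Finset.Ico 10 (10 ^ H) ∪ Finset.Ico (10 ^ H) (10 ^ (H + 1)) :=
        (Finset.Ico_union_Ico_eq_Ico h10H (Nat.pow_le_pow_right (by norm_num) (by omega))).symm
      rw [hsplit, Finset.sum_union (by
        apply Finset.Ico_disjoint_Ico_consecutive)]
      have hodd : SL A B (2 * H + 1) = ∑ m ∈ Finset.Ico (10 ^ H) (10 ^ (H + 1)), oC A B m := by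
        unfold SL
        have e3 : (2 * H + 1 + 1) / 2 = H + 1 := by omega
        have e4 : (2 * H + 1) % 2 = 1 := by omega
        rw [e3, e4]
        norm_num
      have heven : SL A B (2 * H + 1 + 1) = ∑ m ∈ Finset.Ico (10 ^ H) (10 ^ (H + 1)), eC A B m := by
        unfold SL
        have e3 : (2 * H + 1 + 1 + 1) / 2 = H + 1 := by omega
        have e4 : (2 * H + 1 + 1) % 2 = 0 := by omega
        rw [e3, e4]
        norm_num
      rw [hodd, heven]
      simp only [Finset.sum_add_distrib]
      ring

-- ---------- vanishing of per-length sums outside [A, B] ----------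

lemma epal_lb_strict {m : Nat} (hm : 10 ≤ m) : (10:Int) ^ (2 * dN m - 1) < epalN m := by
  obtain ⟨e, he, hc1, hc2, hr1, hr2, hs1, hs2, ho, hp⟩ := dN_decomp hm
  rw [he, show 2 * (e + 2) - 1 = (e + 1) + (e + 2) from by omega, pow_add, hp]
  have hP : (0:Int) < 10 ^ (e + 2) := by positivity
  nlinarith

lemma SL_zero_high {A B : Int} {l : Nat} (hl : 3 ≤ l) (hB : B ≤ 10 ^ (l - 1)) : SL A B l = 0 := by
  unfold SL
  apply Finset.sum_eq_zero
  intro m hmm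
  rw [Finset.mem_Ico] at hmm
  set hN := (l + 1) / 2 with hh
  have hN2 : 2 ≤ hN := by omega
  have hm10 : 10 ≤ m := le_trans (by calc (10:Nat) = 10 ^ 1 := by norm_num
    _ ≤ 10 ^ (hN - 1) := Nat.pow_le_pow_right (by norm_num) (by omega)) hmm.1
  have hdm : dN m = hN := (dN_eq_iff (by omega) (by omega)).2 ⟨hmm.1, hmm.2⟩
  split
  · next hpar =>
    have hl2 : l = 2 * hN - 2 + 2 := by omega
    have : (10:Int) ^ (l - 1) < epalN m := by
      have := epal_lb_strict hm10
      rw [hdm] at this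
      have hexp : l - 1 = 2 * hN - 1 := by omega
      rw [hexp]
      exact this
    simp only [eC]
    rw [if_neg]
    omega
  · next hpar =>
    have hl2 : l = 2 * hN - 1 := by omega
    have : (10:Int) ^ (l - 1) < opalN m := by
      have := opal_lb hm10
      rw [hdm] at this
      have hexp : l - 1 = 2 * hN - 2 := by omega
      rw [hexp]
      exact this
    simp only [oC]
    rw [if_neg]
    omega

lemma SL_zero_low {A B : Int} {l : Nat} (hl : 3 ≤ l) (hA : (10:Int) ^ l ≤ A) : SL A B l = 0 := by
  unfold SL
  apply Finset.sum_eq_zero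
  intro m hmm
  rw [Finset.mem_Ico] at hmm
  set hN := (l + 1) / 2 with hh
  have hN2 : 2 ≤ hN := by omega
  have hm10 : 10 ≤ m := le_trans (by calc (10:Nat) = 10 ^ 1 := by norm_num
    _ ≤ 10 ^ (hN - 1) := Nat.pow_le_pow_right (by norm_num) (by omega)) hmm.1
  have hdm : dN m = hN := (dN_eq_iff (by omega) (by omega)).2 ⟨hmm.1, hmm.2⟩
  split
  · next hpar =>
    have : epalN m < (10:Int) ^ l := by
      have := epal_ub hm10
      rw [hdm] at this
      have hexp : l = 2 * hN := by omega
      rw [hexp]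
      exact this
    simp only [eC]
    rw [if_neg]
    omega
  · next hpar =>
    have : opalN m < (10:Int) ^ l := by
      have := opal_ub hm10
      rw [hdm] at this
      have hexp : l = 2 * hN - 1 := by omega
      rw [hexp]
      exact this
    simp only [oC]
    rw [if_neg]
    omega


-- ---------- B's scan over halves equals the same canonical sum ----------

lemma contrib_zero_of_big {A B : Int} {m : Nat} (hm : 10 ≤ m) (hB : B < opalN m) :
    oC A B m + eC A B m = 0 := by
  have h2 : B < epalN m := lt_of_lt_of_le hB (opal_le_epal hm)
  simp only [oC, eC]
  rw [if_neg (by omega), if_neg (by omega)]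
  norm_num

lemma loopB_eq (A B : Int) (M : Nat) (hM : ∀ m : Nat, 10 ≤ m → M ≤ m → B < opalN m) :
    ∀ (fuel n : Nat) (count : Int), 10 ≤ n → (B + 1 - (n : Int)).toNat ≤ fuel →
      loopB A B fuel count ((n : Nat) : Int) ((10 ^ dN n : Nat) : Int)
        = count + ∑ m ∈ Finset.Ico n M, (oC A B m + eC A B m) := by
  intro fuel
  induction fuel with
  | zero =>
    intro n count hn hfuel
    have hBn : B < (n : Int) := by omega
    have hz : ∀ m ∈ Finset.Ico n M, oC A B m + eC A B m = 0 := by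
      intro m hmm
      rw [Finset.mem_Ico] at hmm
      have hm10 : 10 ≤ m := le_trans hn hmm.1
      apply contrib_zero_of_big hm10
      calc B < (n : Int) := hBn
        _ ≤ (m : Int) := by exact_mod_cast hmm.1
        _ ≤ opalN m := opal_ge hm10
    rw [Finset.sum_eq_zero hz]
    simp [loopB]
  | succ fuel ih =>
    intro n count hn hfuel
    have hd2 := dN_two_le hn
    have hlow : PySem.Int.floordiv ((10 ^ dN n : Nat) : Int) 10 = ((10 ^ (dN n - 1) : Nat) : Int) := by
      have h1 : PySem.Int.floordiv ((10 ^ dN n : Nat) : Int) ((10:Nat) : Int)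
          = ((10 ^ dN n / 10 : Nat) : Int) := PySem.Int.floordiv_natCast _ 10
      have h2 : (10:Nat) ^ dN n / 10 = 10 ^ (dN n - 1) := by
        have h3 := Nat.pow_div (show 1 ≤ dN n by omega) (show 0 < 10 by norm_num)
        simpa using h3
      rw [← h2]
      exact_mod_cast h1
    have hfn : PySem.Int.floordiv ((n : Nat) : Int) 10 = ((n / 10 : Nat) : Int) := by
      exact_mod_cast PySem.Int.floordiv_natCast n 10
    have hrevn10 : revA ((n / 10 : Nat) : Int) = rv (n / 10) := revA_eq (by omega)
    have hop : ((n : Nat) : Int) * ((10 ^ (dN n - 1) : Nat) : Int) + revA ((n / 10 : Nat) : Int)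
        = opalN n := by
      rw [hrevn10]
      unfold opalN
      push_cast
      ring
    have hlead : PySem.Int.floordiv ((n : Nat) : Int) ((10 ^ (dN n - 1) : Nat) : Int)
        = ((leadD n : Nat) : Int) := by
      exact_mod_cast PySem.Int.floordiv_natCast n (10 ^ (dN n - 1))
    simp only [loopB, hlow, hfn, hrevn10]
    have hop' : ((n : Nat) : Int) * ((10 ^ (dN n - 1) : Nat) : Int) + rv (n / 10) = opalN n := by
      unfold opalN; push_cast; ring
    rw [hop']
    by_cases hB : opalN n > B
    · rw [if_pos hB]
      have hz : ∀ m ∈ Finset.Ico n M, oC A B m + eC A B m = 0 := by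
        intro m hmm
        rw [Finset.mem_Ico] at hmm
        have hm10 : 10 ≤ m := le_trans hn hmm.1
        exact contrib_zero_of_big hm10 (lt_of_lt_of_le hB (opal_mono hn hmm.1))
      rw [Finset.sum_eq_zero hz]
      ring
    · rw [if_neg hB]
      push_neg at hB
      have hnM : n < M := by
        by_contra hc
        exact absurd (hM n hn (by omega)) (by omega)
      -- the step's contribution
      have hev : ((n : Nat) : Int) * ((10 ^ dN n : Nat) : Int) + revA ((n : Nat) : Int) = epalN n := by
        rw [revA_eq (by omega : 1 ≤ n)]
        unfold epalN
        push_cast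
        ring
      have hcount1 :
          (if PySem.Int.mod (PySem.Int.floordiv ((n : Nat) : Int) ((10 ^ (dN n - 1) : Nat) : Int)) 2 = 1 then
            (let c1 := if A ≤ opalN n ∧ isPrimeA (opalN n) = true then count + 1 else count
             if A ≤ ((n : Nat) : Int) * ((10 ^ dN n : Nat) : Int) + revA ((n : Nat) : Int) ∧
                 ((n : Nat) : Int) * ((10 ^ dN n : Nat) : Int) + revA ((n : Nat) : Int) ≤ B ∧
                 isPrimeA (((n : Nat) : Int) * ((10 ^ dN n : Nat) : Int) + revA ((n : Nat) : Int)) = true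
              then c1 + 1 else c1)
           else count)
          = count + (oC A B n + eC A B n) := by
        rw [hlead, hev]
        by_cases hpar : leadD n % 2 = 1
        · rw [if_pos ((mod2_natCast_eq_one _).2 hpar)]
          simp only [oC, eC]
          by_cases h1 : A ≤ opalN n ∧ isPrimeA (opalN n) = true
          · have hoc : leadD n % 2 = 1 ∧ A ≤ opalN n ∧ opalN n ≤ B ∧ isPrimeA (opalN n) = true :=
              ⟨hpar, h1.1, hB, h1.2⟩
            by_cases h2 : A ≤ epalN n ∧ epalN n ≤ B ∧ isPrimeA (epalN n) = true
            · have hec : leadD n % 2 = 1 ∧ A ≤ epalN n ∧ epalN n ≤ B ∧ isPrimeA (epalN n) = true :=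
                ⟨hpar, h2⟩
              rw [if_pos h1, if_pos h2, if_pos hoc, if_pos hec]; ring
            · have hec : ¬ (leadD n % 2 = 1 ∧ A ≤ epalN n ∧ epalN n ≤ B ∧ isPrimeA (epalN n) = true) := by
                tauto
              rw [if_pos h1, if_neg h2, if_pos hoc, if_neg hec]; ring
          · have hoc : ¬ (leadD n % 2 = 1 ∧ A ≤ opalN n ∧ opalN n ≤ B ∧ isPrimeA (opalN n) = true) := by
              tauto
            by_cases h2 : A ≤ epalN n ∧ epalN n ≤ B ∧ isPrimeA (epalN n) = true
            · have hec : leadD n % 2 = 1 ∧ A ≤ epalN n ∧ epalN n ≤ B ∧ isPrimeA (epalN n) = true :=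
                ⟨hpar, h2⟩
              rw [if_neg h1, if_pos h2, if_neg hoc, if_pos hec]; ring
            · have hec : ¬ (leadD n % 2 = 1 ∧ A ≤ epalN n ∧ epalN n ≤ B ∧ isPrimeA (epalN n) = true) := by
                tauto
              rw [if_neg h1, if_neg h2, if_neg hoc, if_neg hec]; ring
        · rw [if_neg (fun hx => hpar ((mod2_natCast_eq_one _).1 hx))]
          simp only [oC, eC]
          have hoc : ¬ (leadD n % 2 = 1 ∧ A ≤ opalN n ∧ opalN n ≤ B ∧ isPrimeA (opalN n) = true) := by
            tauto
          have hec : ¬ (leadD n % 2 = 1 ∧ A ≤ epalN n ∧ epalN n ≤ B ∧ isPrimeA (epalN n) = true) := by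
            tauto
          rw [if_neg hoc, if_neg hec]
          ring
      rw [hcount1]
      -- the next state
      have hcast1 : ((n : Nat) : Int) + 1 = ((n + 1 : Nat) : Int) := by push_cast; ring
      have hnext : (if ((n + 1 : Nat) : Int) = ((10 ^ dN n : Nat) : Int)
            then ((10 ^ dN n : Nat) : Int) * 10 else ((10 ^ dN n : Nat) : Int))
          = ((10 ^ dN (n + 1) : Nat) : Int) := by
        by_cases hb : n + 1 = 10 ^ dN n
        · rw [if_pos (by exact_mod_cast hb)]
          have : dN (n + 1) = dN n + 1 := by
            apply (dN_eq_iff (by omega) (by omega)).2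
            constructor
            · simp only [Nat.add_sub_cancel]
              omega
            · rw [pow_succ]
              have := lt_pow_dN n
              omega
          rw [this, pow_succ]
          push_cast
          ring
        · rw [if_neg (fun hx => hb (by exact_mod_cast hx))]
          have : dN (n + 1) = dN n := by
            apply (dN_eq_iff (by omega) (by omega)).2
            have h1 := pow_dN_le (show 1 ≤ n by omega)
            have h2 := lt_pow_dN n
            constructor
            · omega
            · omega
          rw [this]
      rw [hcast1, hnext]
      rw [ih (n + 1) _ (by omega) (by omega)]
      rw [Finset.sum_eq_sum_Ico_succ_bot hnM]
      ring


-- ---------- putting both characterizations together ----------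

lemma len_toChars_neg {A : Int} (hA : A < 0) :
    (PySem.Int.toChars A).length = 1 + dN A.natAbs := by
  simp only [PySem.Int.toChars, if_pos hA, List.length_cons, dN]
  omega

lemma len_toChars_nonneg {A : Int} (hA : 0 ≤ A) :
    (PySem.Int.toChars A).length = dN A.toNat := by
  simp only [PySem.Int.toChars, if_neg (by omega : ¬ A < 0), dN]

lemma dN10 : dN 10 = 2 := by decide

lemma solve_characterized (A B : Int) :
    solve A B = [2, 3, 5, 7, 11].foldl (fun acc i => if A ≤ i ∧ i ≤ B then acc + 1 else acc) 0
      + ∑ l ∈ Finset.Ico (max 3 (PySem.Int.toChars A).length) ((PySem.Int.toChars B).length + 1),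
          SL A B l := by
  simp only [solve]
  have hmax : ((max 3 (PySem.Int.toChars A).length : Nat) : Int)
      = max 3 (((PySem.Int.toChars A).length : Nat) : Int) := by push_cast; rfl
  have hstop : (((PySem.Int.toChars B).length + 1 : Nat) : Int)
      = (((PySem.Int.toChars B).length : Nat) : Int) + 1 := by push_cast; ring
  rw [← hmax, ← hstop]
  rw [outerA_eq A B ((PySem.Int.toChars B).length + 1) _ _ _ (le_max_left _ _) (by omega)]

lemma solve_alt_characterized (A B : Int) (M : Nat)
    (hM : ∀ m : Nat, 10 ≤ m → M ≤ m → B < opalN m) :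
    solve_alt A B = [2, 3, 5, 7, 11].foldl (fun acc i => if A ≤ i ∧ i ≤ B then acc + 1 else acc) 0
      + ∑ m ∈ Finset.Ico 10 M, (oC A B m + eC A B m) := by
  simp only [solve_alt]
  have h10 : (10:Int) = ((10:Nat):Int) := by norm_num
  have h100 : (100:Int) = ((10 ^ dN 10 : Nat) : Int) := by rw [dN10]; norm_num
  rw [h10, h100]
  rw [loopB_eq A B M hM (B.toNat + 1) 10 _ le_rfl (by omega)]

lemma SL_nonneg (A B : Int) (l : Nat) : 0 ≤ SL A B l := by
  unfold SL
  apply Finset.sum_nonneg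
  intro m _
  split <;> · simp only [eC, oC]; split <;> norm_num

lemma SL3_oC (A B : Int) : SL A B 3 = ∑ m ∈ Finset.Ico 10 100, oC A B m := by
  unfold SL
  norm_num

lemma oC_neg100 {A B : Int} (hA : A ≤ 101) (hB : 101 ≤ B) : oC A B 10 = 1 := by
  have h1 : leadD 10 = 1 := by decide
  have h2 : opalN 10 = 101 := by decide
  have h3 : isPrimeA (101 : Int) = true := by decide
  unfold oC
  rw [h1, h2]
  rw [if_pos ⟨by norm_num, hA, hB, h3⟩]

-- ===== VERDICT (by name: the statement is the Claim_ definition above) =====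
theorem solve_spec : Claim_unchanged_solve := by
  intro A B hdom
  unfold Spec_solve
  intro hnd
  unfold D_solve at hnd
  by_cases hB0 : B ≤ 100
  · -- no ≥3-digit palindrome fits below B: both sides reduce to the small count
    rw [solve_characterized,
      solve_alt_characterized A B 10
        (fun m hm _ => lt_of_le_of_lt hB0 (lt_of_lt_of_le (by norm_num) (opal_ge_101 hm)))]
    rw [Finset.Ico_self, Finset.sum_empty]
    rw [Finset.sum_eq_zero]
    intro l hl
    rw [Finset.mem_Ico] at hl
    have hl3 : 3 ≤ l := le_trans (le_max_left _ _) hl.1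
    apply SL_zero_high hl3
    calc B ≤ 100 := hB0
      _ = 10 ^ 2 := by norm_num
      _ ≤ 10 ^ (l - 1) := pow_le_pow_right₀ (by norm_num) (by omega)
  · push_neg at hB0
    have hB1 : 101 ≤ B := by omega
    have hA99 : -99 ≤ A := by omega
    have hBnn : (B : Int) = ((B.toNat : Nat) : Int) := by omega
    have hLB : (PySem.Int.toChars B).length = dN B.toNat := len_toChars_nonneg (by omega)
    have hBlt : B < ((10 ^ dN B.toNat : Nat) : Int) := by
      have := lt_pow_dN B.toNat
      rw [hBnn]
      exact_mod_cast this
    have hL3 : 3 ≤ dN B.toNat := by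
      by_contra hc
      have := (dN_le_iff (n := B.toNat) (k := 2) (by omega)).1 (by omega)
      omega
    have hM : ∀ m : Nat, 10 ≤ m → 10 ^ dN B.toNat ≤ m → B < opalN m := by
      intro m hm hMm
      calc B < ((10 ^ dN B.toNat : Nat) : Int) := hBlt
        _ ≤ (m : Int) := by exact_mod_cast hMm
        _ ≤ opalN m := opal_ge hm
    rw [solve_characterized, solve_alt_characterized A B (10 ^ dN B.toNat) hM]
    rw [← regroup A B (dN B.toNat) (by omega), hLB]
    congr 1
    apply Finset.sum_subset
    · exact Finset.Ico_subset_Ico (le_max_left _ _) (by omega)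
    · intro x hx hnx
      rw [Finset.mem_Ico] at hx
      rw [Finset.mem_Ico, not_and_or] at hnx
      rcases hnx with hlo | hhi
      · -- below A's first length: the palindrome would be smaller than A
        push_neg at hlo
        have hc0 : 3 < max 3 (PySem.Int.toChars A).length := by omega
        have hlenA : 4 ≤ (PySem.Int.toChars A).length := by omega
        have hApos : 0 ≤ A := by
          by_contra hc
          push_neg at hc
          have habs : A.natAbs ≤ 99 := by omega
          have : dN A.natAbs ≤ 2 := (dN_le_iff (by omega)).2 (by omega)
          have := len_toChars_neg hc
          omega
        have hlA : (PySem.Int.toChars A).length = dN A.toNat := len_toChars_nonneg hApos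
        have htA1 : 1 ≤ A.toNat := by
          by_contra hc
          have h0 : A.toNat = 0 := by omega
          have : dN A.toNat = 1 := by rw [h0]; decide
          omega
        apply SL_zero_low hx.1
        have hpow : (10:Nat) ^ x ≤ 10 ^ (dN A.toNat - 1) :=
          Nat.pow_le_pow_right (by norm_num) (by omega)
        have := pow_dN_le htA1
        have hAA : ((A.toNat : Nat) : Int) = A := by omega
        calc (10:Int) ^ x = ((10 ^ x : Nat) : Int) := by push_cast; ring
          _ ≤ ((10 ^ (dN A.toNat - 1) : Nat) : Int) := by exact_mod_cast hpow
          _ ≤ ((A.toNat : Nat) : Int) := by exact_mod_cast this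
          _ = A := hAA
      · push_neg at hhi
        apply SL_zero_high hx.1
        refine le_of_lt ?_
        calc B < ((10 ^ dN B.toNat : Nat) : Int) := hBlt
          _ ≤ ((10 ^ (x - 1) : Nat) : Int) := by
              exact_mod_cast Nat.pow_le_pow_right (by norm_num) (by omega)
          _ = 10 ^ (x - 1) := by push_cast; ring

theorem solve_changed : Claim_changed_solve := by
  unfold Claim_changed_solve; decide

theorem solve_tight : Claim_exact_solve := by
  intro A B hdom hD
  unfold D_solve at hD
  obtain ⟨hA, hB⟩ := hD
  have hBnn : (B : Int) = ((B.toNat : Nat) : Int) := by omega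
  have hLB : (PySem.Int.toChars B).length = dN B.toNat := len_toChars_nonneg (by omega)
  have hBlt : B < ((10 ^ dN B.toNat : Nat) : Int) := by
    have := lt_pow_dN B.toNat
    rw [hBnn]
    exact_mod_cast this
  have hL3 : 3 ≤ dN B.toNat := by
    by_contra hc
    have := (dN_le_iff (n := B.toNat) (k := 2) (by omega)).1 (by omega)
    omega
  have hM : ∀ m : Nat, 10 ≤ m → 10 ^ dN B.toNat ≤ m → B < opalN m := by
    intro m hm hMm
    calc B < ((10 ^ dN B.toNat : Nat) : Int) := hBlt
      _ ≤ (m : Int) := by exact_mod_cast hMm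
      _ ≤ opalN m := opal_ge hm
  have hc0 : 4 ≤ max 3 (PySem.Int.toChars A).length := by
    have hneg : A < 0 := by omega
    have h1 := len_toChars_neg hneg
    have habs : 100 ≤ A.natAbs := by omega
    have : 3 ≤ dN A.natAbs := by
      by_contra hc
      have := (dN_le_iff (n := A.natAbs) (k := 2) (by omega)).1 (by omega)
      omega
    omega
  rw [solve_characterized, solve_alt_characterized A B (10 ^ dN B.toNat) hM, hLB]
  rw [← regroup A B (dN B.toNat) (by omega)]
  have hsub : Finset.Ico (max 3 (PySem.Int.toChars A).length) (dN B.toNat + 1)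
      ⊆ Finset.Ico 3 (2 * dN B.toNat + 1) :=
    Finset.Ico_subset_Ico (by omega) (by omega)
  intro hEq
  have hsums : ∑ l ∈ Finset.Ico (max 3 (PySem.Int.toChars A).length) (dN B.toNat + 1), SL A B l
      = ∑ l ∈ Finset.Ico 3 (2 * dN B.toNat + 1), SL A B l := by omega
  have hdiff := Finset.sum_sdiff (f := SL A B) hsub
  have hmem3 : 3 ∈ Finset.Ico 3 (2 * dN B.toNat + 1) \
      Finset.Ico (max 3 (PySem.Int.toChars A).length) (dN B.toNat + 1) := by
    rw [Finset.mem_sdiff, Finset.mem_Ico, Finset.mem_Ico]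
    constructor
    · omega
    · intro hx
      omega
  have hS3 : 1 ≤ SL A B 3 := by
    rw [SL3_oC]
    calc (1:Int) = oC A B 10 := (oC_neg100 (by omega) hB).symm
      _ ≤ ∑ m ∈ Finset.Ico 10 100, oC A B m := by
          apply Finset.single_le_sum (f := fun m => oC A B m)
          · intro i _
            simp only [oC]
            split <;> norm_num
          · rw [Finset.mem_Ico]; omega
  have hpos : 1 ≤ ∑ l ∈ Finset.Ico 3 (2 * dN B.toNat + 1) \
      Finset.Ico (max 3 (PySem.Int.toChars A).length) (dN B.toNat + 1), SL A B l := by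
    calc (1:Int) ≤ SL A B 3 := hS3
      _ ≤ _ := Finset.single_le_sum (f := SL A B) (fun i _ => SL_nonneg A B i) hmem3
  omega
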